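-- pv_equiv track=rewrite | github.com/CamilaAlderete/IA_tarea_2 | training_results.py | number_of_pieces
-- ===== SOURCE A (Python) =====
-- def number_of_pieces(serialized_board):
--
--     white = 0
--     black = 0
--
--     for i in range(len(serialized_board)):
--
--         char = serialized_board[i]
--         if char == '1' or char == '3':
--             black += 1
--         elif char == '2' or char == '4':
--             white += 1
--
--     return black, white
-- ===== SOURCE B (Python) =====
-- def number_of_pieces(serialized_board):
--     black = serialized_board.count('1') + serialized_board.count('3')
--     white = serialized_board.count('2') + serialized_board.count('4')
--     return black, white
-- ===== Notes on version B (the rewrite author's own statement) =====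
-- stated objective: idiomatic
-- what changed: B replaces A's index loop with per-character if/elif branching by four independent str.count passes (one C-level substring scan per piece symbol), with no explicit loop or conditional at all.
import Mathlib
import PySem

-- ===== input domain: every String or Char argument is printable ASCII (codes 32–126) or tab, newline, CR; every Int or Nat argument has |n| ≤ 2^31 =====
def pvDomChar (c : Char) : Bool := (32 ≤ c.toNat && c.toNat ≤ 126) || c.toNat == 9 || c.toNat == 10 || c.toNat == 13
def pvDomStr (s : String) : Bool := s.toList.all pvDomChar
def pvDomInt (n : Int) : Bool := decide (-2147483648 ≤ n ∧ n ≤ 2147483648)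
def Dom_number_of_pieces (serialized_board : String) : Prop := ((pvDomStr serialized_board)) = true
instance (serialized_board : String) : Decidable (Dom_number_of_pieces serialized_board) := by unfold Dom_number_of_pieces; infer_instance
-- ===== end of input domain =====

-- B replaces A's index loop with per-character if/elif branching by four independent str.count passes (objective: idiomatic).

-- ===== PORT A =====
def number_of_pieces (serialized_board : String) : Int × Int :=
  -- state (white, black); for i in range(len(..)): char = s[i] (i always in range, so pyGetD is exact here)
  let st := (PySem.List.pyRange 0 (PySem.Str.len serialized_board) 1).foldl
    (fun (wb : Int × Int) i =>
      if PySem.List.pyGetD serialized_board.toList i ' ' = '1' ∨ PySem.List.pyGetD serialized_board.toList i ' ' = '3' then (wb.1, wb.2 + 1)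
      else if PySem.List.pyGetD serialized_board.toList i ' ' = '2' ∨ PySem.List.pyGetD serialized_board.toList i ' ' = '4' then (wb.1 + 1, wb.2)
      else wb) (0, 0)
  (st.2, st.1)

-- ===== PORT B =====
def number_of_pieces_alt (serialized_board : String) : Int × Int :=
  let black : Int := PySem.Str.count serialized_board "1" + PySem.Str.count serialized_board "3"
  let white : Int := PySem.Str.count serialized_board "2" + PySem.Str.count serialized_board "4"
  (black, white)

-- ===== PRECONDITION & SPEC =====
def Spec_number_of_pieces (serialized_board : String) (out : Int × Int) : Prop := out = number_of_pieces_alt serialized_board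
instance (serialized_board : String) (out : Int × Int) : Decidable (Spec_number_of_pieces serialized_board out) := by unfold Spec_number_of_pieces; infer_instance

-- ===== CLAIM (what is proved, stated in full; the proofs are below) =====
def Claim_equal_number_of_pieces : Prop := ∀ (serialized_board : String), Dom_number_of_pieces serialized_board → Spec_number_of_pieces serialized_board (number_of_pieces serialized_board)

-- ===== LEMMAS AND PROOFS =====

-- Python's s.count(sub) for a one-character sub counts that character's occurrences.
theorem nop_count_go_singleton (c : Char) (fuel : Nat) (l : List Char) (acc : Nat) (h : l.length ≤ fuel) :
    PySem.Chars.count.go [c] fuel l acc = acc + l.count c := by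
  induction fuel generalizing l acc with
  | zero => interval_cases hl : l.length; · simp_all [PySem.Chars.count.go, List.length_eq_zero_iff.mp hl]
  | succ n ih =>
    cases l with
    | nil => simp [PySem.Chars.count.go]
    | cons hd t =>
      simp only [PySem.Chars.count.go]
      by_cases hc : hd = c
      · subst hc
        simp [List.isPrefixOf, ih t _ (by simpa using Nat.lt_succ_iff.mp (by simpa using h))]
        omega
      · simp [List.isPrefixOf, hc, ih t _ (by simpa using Nat.lt_succ_iff.mp (by simpa using h)), Ne.symm hc]

theorem nop_count_singleton (s : List Char) (c : Char) :
    PySem.Chars.count s [c] = s.count c := by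
  simp [PySem.Chars.count, nop_count_go_singleton c s.length s 0 le_rfl]

-- A's counting fold, characterised by List.count.
theorem nop_foldl_count (cs : List Char) (w b : Int) :
    cs.foldl (fun (wb : Int × Int) char =>
      if char = '1' ∨ char = '3' then (wb.1, wb.2 + 1)
      else if char = '2' ∨ char = '4' then (wb.1 + 1, wb.2)
      else wb) (w, b)
    = (w + cs.count '2' + cs.count '4', b + cs.count '1' + cs.count '3') := by
  induction cs generalizing w b with
  | nil => simp
  | cons c cs ih =>
    by_cases h1 : c = '1' ∨ c = '3'
    · rcases h1 with h | h <;> subst h <;>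
        simp [List.foldl_cons, ih] <;> ring_nf
    · by_cases h2 : c = '2' ∨ c = '4'
      · rcases h2 with h | h <;> subst h <;>
          simp [List.foldl_cons, ih] <;> ring_nf
      · push Not at h1 h2
        simp [List.foldl_cons, h1.1, h1.2, h2.1, h2.2, ih]

-- ===== VERDICT (by name: the statement is the Claim_ definition above) =====
theorem number_of_pieces_spec : Claim_equal_number_of_pieces := by
  intro s _
  unfold Spec_number_of_pieces number_of_pieces number_of_pieces_alt
  simp only []
  rw [PySem.Str.len_eq, PySem.List.foldl_pyRange_zero_pyGetD' s.toList ' '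
      (fun (wb : Int × Int) char =>
        if char = '1' ∨ char = '3' then (wb.1, wb.2 + 1)
        else if char = '2' ∨ char = '4' then (wb.1 + 1, wb.2)
        else wb) (0, 0)]
  rw [nop_foldl_count]
  simp [PySem.Str.count_eq, nop_count_singleton]
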